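-- pv_equiv track=rewrite | github.com/PlanetDestroyyer/KV-1 | core/neurosymbolic_memory.py | _induce_formula_from_examples
-- ===== SOURCE A (Python) =====
-- from typing import Dict, List, Optional, Tuple, Any
--
-- def _induce_formula_from_examples(examples: List[Any]) -> List[str]:
--     """
--     Induce formulas from examples (inductive learning).
--
--     Example: [2, 4, 6, 8] → "n % 2 = 0"
--     """
--     formulas = []
--
--     if not examples or len(examples) < 2:
--         return formulas
--
--     nums = [x for x in examples if isinstance(x, (int, float))]
--     if len(nums) < 2:
--         return formulas
--
--     # Check if all even
--     if all(n % 2 == 0 for n in nums):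
--         formulas.append("n % 2 = 0")
--
--     # Check if all odd
--     if all(n % 2 == 1 for n in nums):
--         formulas.append("n % 2 = 1")
--
--     # Check arithmetic sequence
--     if len(nums) >= 3:
--         diffs = [nums[i+1] - nums[i] for i in range(len(nums)-1)]
--         if len(set(diffs)) == 1:
--             # Constant difference - arithmetic sequence
--             d = diffs[0]
--             formulas.append(f"n[i+1] = n[i] + {d}")
--
--     return formulas
-- ===== SOURCE B (Python) =====
-- def _induce_formula_from_examples(examples):
--     formulas = []
--     if not examples or len(examples) < 2:
--         return formulas
--     nums = [x for x in examples if isinstance(x, (int, float))]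
--     if len(nums) < 2:
--         return formulas
--     all_even = True
--     all_odd = True
--     is_arith = True
--     first_diff = None
--     prev = None
--     for n in nums:
--         if n % 2 != 0:
--             all_even = False
--         if n % 2 != 1:
--             all_odd = False
--         if prev is not None:
--             d = n - prev
--             if first_diff is None:
--                 first_diff = d
--             elif d != first_diff:
--                 is_arith = False
--         prev = n
--     if all_even:
--         formulas.append("n % 2 = 0")
--     if all_odd:
--         formulas.append("n % 2 = 1")
--     if len(nums) >= 3 and is_arith:
--         formulas.append(f"n[i+1] = n[i] + {first_diff}")
--     return formulas
-- ===== Notes on version B (the rewrite author's own statement) =====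
-- stated objective: alternative
-- what changed: A makes three independent passes (all-even, all-odd, build a diffs list and deduplicate it into a set); B makes one fusing pass carrying all_even/all_odd/is_arith flags plus the previous value and the first difference, never materialising the diffs list or a set.
import Mathlib
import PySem

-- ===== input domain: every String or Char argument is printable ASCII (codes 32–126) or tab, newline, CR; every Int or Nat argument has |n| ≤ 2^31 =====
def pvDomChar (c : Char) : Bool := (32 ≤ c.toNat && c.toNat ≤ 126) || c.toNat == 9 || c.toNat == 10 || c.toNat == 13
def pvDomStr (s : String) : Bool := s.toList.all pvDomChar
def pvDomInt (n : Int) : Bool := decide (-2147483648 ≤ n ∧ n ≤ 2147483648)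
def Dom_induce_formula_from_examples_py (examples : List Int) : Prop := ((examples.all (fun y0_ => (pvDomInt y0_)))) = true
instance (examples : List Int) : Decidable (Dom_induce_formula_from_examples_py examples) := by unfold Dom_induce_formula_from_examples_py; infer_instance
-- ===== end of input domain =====

-- B fuses A's three independent passes (all-even, all-odd, diffs list + set dedup) into one
-- loop carrying flags, the previous value and the first difference; same values, same cost class.

-- ===== PORT A =====
-- the list comprehension 'nums = [x for x in examples if isinstance(x, (int, float))]':
-- every element of a List Int is an int, so the filter keeps every element
def induce_formula_from_examples_py (examples : List Int) : List String :=
  if examples = [] ∨ examples.length < 2 then []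
  else
    let nums := examples
    if nums.length < 2 then []
    else
      let f1 : List String :=
        if nums.all (fun n => decide (PySem.Int.mod n 2 = 0)) then ["n % 2 = 0"] else []
      let f2 : List String :=
        if nums.all (fun n => decide (PySem.Int.mod n 2 = 1)) then ["n % 2 = 1"] else []
      let f3 : List String :=
        if 3 ≤ nums.length then
          -- indices i and i+1 of the comprehension are nonnegative and in range, so plain getD is exact
          let diffs := (List.range (nums.length - 1)).map
            (fun i => nums.getD (i + 1) 0 - nums.getD i 0)
          if (PySem.Set.ofList diffs).length = 1 then
            ["n[i+1] = n[i] + " ++ PySem.Int.toStr (diffs.headD 0)]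
          else []
        else []
      f1 ++ f2 ++ f3

-- ===== PORT B =====
-- loop state: (all_even, all_odd, is_arith, first_diff, prev)
def pvStep : (Bool × Bool × Bool × Option Int × Option Int) → Int →
    (Bool × Bool × Bool × Option Int × Option Int)
  | (ae, ao, ia, fd, prev), n =>
    let ae' := if ¬ PySem.Int.mod n 2 = 0 then false else ae
    let ao' := if ¬ PySem.Int.mod n 2 = 1 then false else ao
    let iafd : Bool × Option Int :=
      match prev, fd with
      | none, _ => (ia, fd)
      | some p, none => (ia, some (n - p))
      | some p, some f => (if ¬ n - p = f then false else ia, some f)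
    (ae', ao', iafd.1, iafd.2, some n)

def induce_formula_from_examples_py_alt (examples : List Int) : List String :=
  if examples = [] ∨ examples.length < 2 then []
  else
    let nums := examples
    if nums.length < 2 then []
    else
      match nums.foldl pvStep (true, true, true, none, none) with
      | (ae, ao, ia, fd, _) =>
        (if ae then ["n % 2 = 0"] else []) ++
        (if ao then ["n % 2 = 1"] else []) ++
        (if 3 ≤ nums.length ∧ ia = true then
          ["n[i+1] = n[i] + " ++ PySem.Int.toStr (fd.getD 0)] else [])

-- ===== PRECONDITION & SPEC =====
def Spec_induce_formula_from_examples_py (examples : List Int) (out : List String) : Prop := out = induce_formula_from_examples_py_alt examples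
instance (examples : List Int) (out : List String) : Decidable (Spec_induce_formula_from_examples_py examples out) := by unfold Spec_induce_formula_from_examples_py; infer_instance

-- ===== CLAIM (what is proved, stated in full; the proofs are below) =====
def Claim_equal_induce_formula_from_examples_py : Prop := ∀ (examples : List Int), Dom_induce_formula_from_examples_py examples → Spec_induce_formula_from_examples_py examples (induce_formula_from_examples_py examples)

-- ===== LEMMAS AND PROOFS =====

theorem pvTwoIte (c1 c2 : Prop) [Decidable c1] [Decidable c2] (y : Bool) :
    ((if ¬ c2 then false else (if ¬ c1 then false else true)) && y) =
      (decide c1 && (decide c2 && y)) := by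
  by_cases h1 : c1 <;> by_cases h2 : c2 <;> simp [h1, h2]

theorem pvIteAnd (c : Prop) [Decidable c] (x y : Bool) :
    ((if ¬ c then false else x) && y) = (x && (decide c && y)) := by
  by_cases h : c <;> simp [h]

-- the chain of consecutive differences all equal f, starting from previous value p
def pvChain (f p : Int) : List Int → Bool
  | [] => true
  | n :: xs => (decide (n - p = f)) && pvChain f n xs

theorem pvFold_char (xs : List Int) : ∀ (ae ao ia : Bool) (f p : Int),
    xs.foldl pvStep (ae, ao, ia, some f, some p) =
      (ae && xs.all (fun n => decide (PySem.Int.mod n 2 = 0)),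
       ao && xs.all (fun n => decide (PySem.Int.mod n 2 = 1)),
       ia && pvChain f p xs,
       some f,
       some (xs.getLastD p)) := by
  induction xs with
  | nil => simp [pvChain]
  | cons n xs ih =>
    intro ae ao ia f p
    simp only [List.foldl_cons, pvStep]
    rw [ih]
    simp only [List.all_cons, pvChain, List.getLastD_cons]
    rw [pvIteAnd, pvIteAnd, pvIteAnd]

theorem pvAdd_length_le {s : List Int} {x : Int} : s.length ≤ (PySem.Set.add s x).length := by
  simp only [PySem.Set.add]
  split <;> simp

theorem pvFoldAdd_length_le (ds : List Int) : ∀ (s : List Int),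
    s.length ≤ (ds.foldl PySem.Set.add s).length := by
  induction ds with
  | nil => intro s; simp
  | cons d ds ih =>
    intro s
    exact le_trans pvAdd_length_le (ih _)

theorem pvSet_singleton_iff (ds : List Int) : ∀ (d : Int),
    (PySem.Set.ofList (d :: ds)).length = 1 ↔ ds.all (fun x => decide (x = d)) = true := by
  induction ds with
  | nil => intro d; simp [PySem.Set.ofList]
  | cons n ds ih =>
    intro d
    by_cases h : n = d
    · subst h
      simpa [PySem.Set.ofList, PySem.Set.add, PySem.Set.contains] using ih n
    · simp only [PySem.Set.ofList, List.foldl_cons] at *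
      have hadd : PySem.Set.add (PySem.Set.add PySem.Set.empty d) n = [d, n] := by
        simp [PySem.Set.add, PySem.Set.contains, PySem.Set.empty, h]
      have h2 : 2 ≤ ((ds.foldl PySem.Set.add [d, n]).length) := by
        simpa using pvFoldAdd_length_le ds [d, n]
      rw [hadd]
      constructor
      · intro hl; omega
      · intro hall; simp at hall; exact absurd hall.1 h

-- the diffs comprehension on a list with head x, second element y
theorem pvDiffs_cons (x y : Int) (t : List Int) :
    (List.range ((x :: y :: t).length - 1)).map
        (fun i => (x :: y :: t).getD (i + 1) 0 - (x :: y :: t).getD i 0) =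
      (y - x) :: (List.range ((y :: t).length - 1)).map
        (fun i => (y :: t).getD (i + 1) 0 - (y :: t).getD i 0) := by
  simp [List.range_succ_eq_map, List.map_map, Function.comp]

-- pvChain over consecutive elements = "all consecutive diffs equal f"
theorem pvChain_diffs (xs : List Int) : ∀ (f p : Int),
    pvChain f p xs =
      ((List.range ((p :: xs).length - 1)).map
        (fun i => (p :: xs).getD (i + 1) 0 - (p :: xs).getD i 0)).all
        (fun x => decide (x = f)) := by
  induction xs with
  | nil => intro f p; simp [pvChain]
  | cons n xs ih =>
    intro f p
    rw [pvDiffs_cons]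
    simp only [pvChain, List.all_cons]
    rw [ih]

theorem pvEven_eq (a b : Int) (rest : List Int) :
    ((if ¬ PySem.Int.mod b 2 = 0 then false else
        (if ¬ PySem.Int.mod a 2 = 0 then false else true)) &&
      rest.all (fun n => decide (PySem.Int.mod n 2 = 0))) =
      (a :: b :: rest).all (fun n => decide (PySem.Int.mod n 2 = 0)) := by
  rw [pvTwoIte, List.all_cons, List.all_cons]

theorem pvOdd_eq (a b : Int) (rest : List Int) :
    ((if ¬ PySem.Int.mod b 2 = 1 then false else
        (if ¬ PySem.Int.mod a 2 = 1 then false else true)) &&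
      rest.all (fun n => decide (PySem.Int.mod n 2 = 1))) =
      (a :: b :: rest).all (fun n => decide (PySem.Int.mod n 2 = 1)) := by
  rw [pvTwoIte, List.all_cons, List.all_cons]

-- the main case: lists of length ≥ 2
theorem pvKey (a b : Int) (rest : List Int) :
    induce_formula_from_examples_py (a :: b :: rest) =
      induce_formula_from_examples_py_alt (a :: b :: rest) := by
  have hB : induce_formula_from_examples_py_alt (a :: b :: rest) =
      (let st := rest.foldl pvStep
        ((if ¬ PySem.Int.mod b 2 = 0 then false else
            (if ¬ PySem.Int.mod a 2 = 0 then false else true)),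
         (if ¬ PySem.Int.mod b 2 = 1 then false else
            (if ¬ PySem.Int.mod a 2 = 1 then false else true)),
         true, some (b - a), some b)
       (if st.1 then ["n % 2 = 0"] else []) ++
       (if st.2.1 then ["n % 2 = 1"] else []) ++
       (if 3 ≤ (a :: b :: rest).length ∧ st.2.2.1 = true then
         ["n[i+1] = n[i] + " ++ PySem.Int.toStr (st.2.2.2.1.getD 0)] else [])) := rfl
  have hA : induce_formula_from_examples_py (a :: b :: rest) =
      (if (a :: b :: rest).all (fun n => decide (PySem.Int.mod n 2 = 0)) then ["n % 2 = 0"] else []) ++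
      (if (a :: b :: rest).all (fun n => decide (PySem.Int.mod n 2 = 1)) then ["n % 2 = 1"] else []) ++
      (if 3 ≤ (a :: b :: rest).length then
        (if (PySem.Set.ofList ((List.range ((a :: b :: rest).length - 1)).map
              (fun i => (a :: b :: rest).getD (i + 1) 0 - (a :: b :: rest).getD i 0))).length = 1 then
          ["n[i+1] = n[i] + " ++ PySem.Int.toStr
            (((List.range ((a :: b :: rest).length - 1)).map
              (fun i => (a :: b :: rest).getD (i + 1) 0 - (a :: b :: rest).getD i 0)).headD 0)]
         else [])
       else []) := rfl
  rw [hA, hB, pvFold_char]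
  simp only []
  have hdiffs := pvDiffs_cons a b rest
  have hset : (PySem.Set.ofList ((List.range ((a :: b :: rest).length - 1)).map
        (fun i => (a :: b :: rest).getD (i + 1) 0 - (a :: b :: rest).getD i 0))).length = 1 ↔
      pvChain (b - a) b rest = true := by
    rw [hdiffs, pvSet_singleton_iff, pvChain_diffs]
  have hhead : (((List.range ((a :: b :: rest).length - 1)).map
        (fun i => (a :: b :: rest).getD (i + 1) 0 - (a :: b :: rest).getD i 0)).headD 0) = b - a := by
    rw [hdiffs]; rfl
  rw [pvEven_eq, pvOdd_eq, hhead]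
  congr 1
  by_cases hlen : 3 ≤ (a :: b :: rest).length <;> by_cases hc : pvChain (b - a) b rest = true
  · rw [if_pos hlen, if_pos (hset.mpr hc), if_pos ⟨hlen, by simp [hc]⟩]; rfl
  · rw [if_pos hlen, if_neg (fun h => hc (hset.mp h)),
      if_neg (fun h => hc (by simpa using h.2))]
  · rw [if_neg hlen, if_neg (fun h => hlen h.1)]
  · rw [if_neg hlen, if_neg (fun h => hlen h.1)]

-- ===== VERDICT (by name: the statement is the Claim_ definition above) =====
theorem induce_formula_from_examples_py_spec : Claim_equal_induce_formula_from_examples_py := by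
  intro examples _
  unfold Spec_induce_formula_from_examples_py
  match examples with
  | [] => rfl
  | [x] => rfl
  | a :: b :: rest => exact pvKey a b rest
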